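-- pv_equiv track=rewrite | github.com/omer475/ten-news-website | step2_jina_full_article_fetching.py | _parse_jina_response
-- ===== SOURCE A (Python) =====
-- from typing import Optional, Dict, List
--
-- def _parse_jina_response(content: str, original_url: str) -> Dict:
--     """
--     Parse Jina's markdown response
--     """
--     lines = content.split('\n')
--
--     title = ""
--     url_source = original_url
--     published_time = ""
--     text_lines = []
--
--     # Parse header information
--     in_content = False
--     for line in lines:
--         if line.startswith("Title: "):
--             title = line.replace("Title: ", "").strip()
--         elif line.startswith("URL Source: "):
--             url_source = line.replace("URL Source: ", "").strip()
--         elif line.startswith("Published Time: "):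
--             published_time = line.replace("Published Time: ", "").strip()
--         elif line.strip() == "" and not in_content:
--             # Empty line after headers means content starts
--             in_content = True
--         elif in_content:
--             text_lines.append(line)
--
--     # Join text content
--     text = '\n'.join(text_lines).strip()
--
--     # Truncate if too long (Claude has token limits)
--     max_chars = 15000  # ~3750 tokens
--     if len(text) > max_chars:
--         text = text[:max_chars] + "\n\n[Content truncated...]"
--
--     return {
--         'url': url_source,
--         'title': title,
--         'text': text,
--         'published_time': published_time
--     }
-- ===== SOURCE B (Python) =====
-- # B: two-phase decomposition — per-field reverse search for the last header match,
-- # then slice after the first blank line, filter out header-prefixed lines, join.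
-- _HEADER_PREFIXES = ("Title: ", "URL Source: ", "Published Time: ")
--
--
-- def _last_field(lines, prefix, default):
--     for line in reversed(lines):
--         if line.startswith(prefix):
--             return line.replace(prefix, "").strip()
--     return default
--
--
-- def _parse_jina_response(content: str, original_url: str):
--     lines = content.split('\n')
--
--     title = _last_field(lines, "Title: ", "")
--     url_source = _last_field(lines, "URL Source: ", original_url)
--     published_time = _last_field(lines, "Published Time: ", "")
--
--     # body = everything after the first blank line, minus header-prefixed lines
--     blank = next((i for i, l in enumerate(lines) if l.strip() == ""), None)
--     body = [] if blank is None else [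
--         l for l in lines[blank + 1:]
--         if not l.startswith(_HEADER_PREFIXES)
--     ]
--
--     text = '\n'.join(body).strip()
--     max_chars = 15000
--     if len(text) > max_chars:
--         text = text[:max_chars] + "\n\n[Content truncated...]"
--
--     return {
--         'url': url_source,
--         'title': title,
--         'text': text,
--         'published_time': published_time,
--     }
-- ===== Notes on version B (the rewrite author's own statement) =====
-- stated objective: alternative
-- what changed: A's single stateful scan with an in_content flag is replaced by a two-phase decomposition: a per-field reverse search returning the last header match, and the body computed as the slice after the first blank line filtered of header-prefixed lines.
import Mathlib
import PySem

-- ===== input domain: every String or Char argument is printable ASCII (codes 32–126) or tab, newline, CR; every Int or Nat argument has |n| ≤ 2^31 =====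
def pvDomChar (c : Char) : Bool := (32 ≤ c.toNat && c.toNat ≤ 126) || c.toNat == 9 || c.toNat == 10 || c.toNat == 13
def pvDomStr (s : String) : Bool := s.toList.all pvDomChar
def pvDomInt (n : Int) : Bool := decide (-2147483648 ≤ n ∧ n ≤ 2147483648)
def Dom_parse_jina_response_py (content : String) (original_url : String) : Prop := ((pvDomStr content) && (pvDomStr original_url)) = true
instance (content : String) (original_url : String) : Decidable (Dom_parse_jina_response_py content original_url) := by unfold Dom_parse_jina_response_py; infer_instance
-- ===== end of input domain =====

-- B replaces A's single stateful scan by a different decomposition: per-field reverse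
-- search for the last header match, plus slice-after-first-blank-line + filter for the body
-- (objective: alternative/simpler structure, same cost).

-- ===== PORT A =====
-- one fold step of A's for-loop; state = (title, url_source, published_time, text_lines, in_content)
def pvStepA (s : String × String × String × List String × Bool) (line : String) :
    String × String × String × List String × Bool :=
  let (title, url_source, published_time, text_lines, in_content) := s
  if PySem.Str.startswith line "Title: " then
    (PySem.Str.strip (PySem.Str.replace line "Title: " ""), url_source, published_time, text_lines, in_content)
  else if PySem.Str.startswith line "URL Source: " then
    (title, PySem.Str.strip (PySem.Str.replace line "URL Source: " ""), published_time, text_lines, in_content)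
  else if PySem.Str.startswith line "Published Time: " then
    (title, url_source, PySem.Str.strip (PySem.Str.replace line "Published Time: " ""), text_lines, in_content)
  else if (PySem.Str.strip line == "") && !in_content then
    (title, url_source, published_time, text_lines, true)
  else if in_content then
    (title, url_source, published_time, text_lines ++ [line], in_content)
  else
    (title, url_source, published_time, text_lines, in_content)

def parse_jina_response_py (content : String) (original_url : String) : List (String × String) :=
  let lines := (PySem.Chars.splitOn content.toList ['\n']).map String.ofList
  let st := lines.foldl pvStepA ("", original_url, "", ([] : List String), false)
  let text := PySem.Str.strip (PySem.Str.join "\n" st.2.2.2.1)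
  let text := if PySem.Str.len text > 15000 then
      PySem.Str.slice text none (some 15000) ++ "\n\n[Content truncated...]"
    else text
  [("url", st.2.1), ("title", st.1), ("text", text), ("published_time", st.2.2.1)]

-- ===== PORT B =====
-- B helper: scan the reversed line list, return the first (= last in original order) header match
def pvLastField : List String → String → String → String
  | [], _, d => d
  | l :: ls, p, d =>
    if PySem.Str.startswith l p then PySem.Str.strip (PySem.Str.replace l p "")
    else pvLastField ls p d

-- B helper: line.startswith(("Title: ", "URL Source: ", "Published Time: "))
def pvIsHeader (l : String) : Bool :=
  PySem.Str.startswith l "Title: " || PySem.Str.startswith l "URL Source: " ||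
    PySem.Str.startswith l "Published Time: "

-- B helper: body = lines after the first blank line, minus header-prefixed lines
def pvBodyOf (lines : List String) : List String :=
  match lines.findIdx? (fun l => PySem.Str.strip l == "") with
  | none => []
  | some i => (lines.drop (i + 1)).filter (fun l => !pvIsHeader l)

def parse_jina_response_py_alt (content : String) (original_url : String) : List (String × String) :=
  let lines := (PySem.Chars.splitOn content.toList ['\n']).map String.ofList
  let title := pvLastField lines.reverse "Title: " ""
  let url_source := pvLastField lines.reverse "URL Source: " original_url
  let published_time := pvLastField lines.reverse "Published Time: " ""
  let body := pvBodyOf lines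
  let text := PySem.Str.strip (PySem.Str.join "\n" body)
  let text := if PySem.Str.len text > 15000 then
      PySem.Str.slice text none (some 15000) ++ "\n\n[Content truncated...]"
    else text
  [("url", url_source), ("title", title), ("text", text), ("published_time", published_time)]

-- ===== PRECONDITION & SPEC =====
def Spec_parse_jina_response_py (content : String) (original_url : String) (out : List (String × String)) : Prop := out = parse_jina_response_py_alt content original_url
instance (content : String) (original_url : String) (out : List (String × String)) : Decidable (Spec_parse_jina_response_py content original_url out) := by unfold Spec_parse_jina_response_py; infer_instance

-- ===== CLAIM (what is proved, stated in full; the proofs are below) =====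
def Claim_equal_parse_jina_response_py : Prop := ∀ (content : String) (original_url : String), Dom_parse_jina_response_py content original_url → Spec_parse_jina_response_py content original_url (parse_jina_response_py content original_url)

-- ===== LEMMAS AND PROOFS =====

-- if `l` starts with `p` and `p` starts with `c`, then `l` starts with `c`
theorem pvHead_of_sw (l p : String) (h : PySem.Str.startswith l p = true)
    (c : Char) (hc : p.toList.head? = some c) : l.toList.head? = some c := by
  simp only [PySem.Str.startswith, PySem.Chars.startswith, List.isPrefixOf_iff_prefix] at h
  obtain ⟨t, ht⟩ := h
  cases hp : p.toList with
  | nil => simp [hp] at hc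
  | cons a as =>
    rw [hp] at ht hc
    rw [← ht]
    simpa using hc

-- distinct first characters make two startswith tests mutually exclusive
theorem pvSw_disj (l p q : String) (c d : Char) (hp : p.toList.head? = some c)
    (hq : q.toList.head? = some d) (hne : c ≠ d)
    (h : PySem.Str.startswith l p = true) : PySem.Str.startswith l q = false := by
  cases hb : PySem.Str.startswith l q with
  | false => rfl
  | true =>
    have h1 := pvHead_of_sw l p h c hp
    have h2 := pvHead_of_sw l q hb d hq
    rw [h1] at h2
    simp at h2
    exact absurd h2 hne

-- a line starting with a non-space character does not strip to the empty string
theorem pvNonblank_of_sw (l p : String) (h : PySem.Str.startswith l p = true)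
    (c : Char) (hc : p.toList.head? = some c) (hsp : PySem.Chars.isspace c = false) :
    (PySem.Str.strip l == "") = false := by
  have hl := pvHead_of_sw l p h c hc
  cases hll : l.toList with
  | nil => rw [hll] at hl; simp at hl
  | cons a as =>
    rw [hll] at hl
    simp only [List.head?_cons, Option.some.injEq] at hl
    subst hl
    by_contra hb
    have hb' : PySem.Str.strip l = "" := by
      cases he : (PySem.Str.strip l == "") with
      | false => exact absurd he hb
      | true => exact eq_of_beq he
    have hlist : PySem.Chars.strip l.toList = [] := by
      have := congrArg String.toList hb'
      rwa [PySem.Str.toList_strip] at this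
    rw [hll] at hlist
    simp only [PySem.Chars.strip, PySem.Chars.lstrip, PySem.Chars.rstrip] at hlist
    rw [List.dropWhile_cons, hsp] at hlist
    simp only [Bool.false_eq_true, if_false, List.reverse_eq_nil_iff] at hlist
    rw [List.dropWhile_eq_nil_iff] at hlist
    have ha : PySem.Chars.isspace a = true := hlist a (by simp)
    rw [hsp] at ha
    exact Bool.false_ne_true ha

theorem pvTitle_head : ("Title: " : String).toList.head? = some 'T' := by decide
theorem pvUrl_head : ("URL Source: " : String).toList.head? = some 'U' := by decide
theorem pvPub_head : ("Published Time: " : String).toList.head? = some 'P' := by decide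

-- pvLastField over a snoc: the last element is consulted first
theorem pvLastField_snoc (xs : List String) (l p d : String) :
    pvLastField (xs ++ [l]) p d =
      pvLastField xs p (if PySem.Str.startswith l p then PySem.Str.strip (PySem.Str.replace l p "") else d) := by
  induction xs with
  | nil => simp [pvLastField]
  | cons x xs ih => simp [pvLastField, ih]

-- step lemmas for the three header components of A's state
theorem pvStepA_title (s : String × String × String × List String × Bool) (l : String) :
    (pvStepA s l).1 =
      if PySem.Str.startswith l "Title: " then PySem.Str.strip (PySem.Str.replace l "Title: " "") else s.1 := by
  obtain ⟨t, u, p, tl, inc⟩ := s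
  simp only [pvStepA]
  split_ifs <;> rfl

theorem pvStepA_url (s : String × String × String × List String × Bool) (l : String) :
    (pvStepA s l).2.1 =
      if PySem.Str.startswith l "URL Source: " then PySem.Str.strip (PySem.Str.replace l "URL Source: " "") else s.2.1 := by
  obtain ⟨t, u, p, tl, inc⟩ := s
  simp only [pvStepA]
  by_cases h1 : PySem.Str.startswith l "Title: " = true
  · rw [if_pos h1, pvSw_disj l "Title: " "URL Source: " 'T' 'U' pvTitle_head pvUrl_head (by decide) h1]
    rfl
  · rw [if_neg h1]
    split_ifs <;> rfl

theorem pvStepA_pub (s : String × String × String × List String × Bool) (l : String) :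
    (pvStepA s l).2.2.1 =
      if PySem.Str.startswith l "Published Time: " then PySem.Str.strip (PySem.Str.replace l "Published Time: " "") else s.2.2.1 := by
  obtain ⟨t, u, p, tl, inc⟩ := s
  simp only [pvStepA]
  by_cases h1 : PySem.Str.startswith l "Title: " = true
  · rw [if_pos h1, pvSw_disj l "Title: " "Published Time: " 'T' 'P' pvTitle_head pvPub_head (by decide) h1]
    rfl
  · rw [if_neg h1]
    by_cases h2 : PySem.Str.startswith l "URL Source: " = true
    · rw [if_pos h2, pvSw_disj l "URL Source: " "Published Time: " 'U' 'P' pvUrl_head pvPub_head (by decide) h2]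
      rfl
    · rw [if_neg h2]
      split_ifs <;> rfl

-- the three header components of A's fold are B's reverse searches
theorem pvFoldA_title (ls : List String) : ∀ s : String × String × String × List String × Bool,
    (ls.foldl pvStepA s).1 = pvLastField ls.reverse "Title: " s.1 := by
  induction ls with
  | nil => intro s; simp [pvLastField]
  | cons l ls ih =>
    intro s
    rw [List.foldl_cons, ih, List.reverse_cons, pvLastField_snoc, pvStepA_title]

theorem pvFoldA_url (ls : List String) : ∀ s : String × String × String × List String × Bool,
    (ls.foldl pvStepA s).2.1 = pvLastField ls.reverse "URL Source: " s.2.1 := by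
  induction ls with
  | nil => intro s; simp [pvLastField]
  | cons l ls ih =>
    intro s
    rw [List.foldl_cons, ih, List.reverse_cons, pvLastField_snoc, pvStepA_url]

theorem pvFoldA_pub (ls : List String) : ∀ s : String × String × String × List String × Bool,
    (ls.foldl pvStepA s).2.2.1 = pvLastField ls.reverse "Published Time: " s.2.2.1 := by
  induction ls with
  | nil => intro s; simp [pvLastField]
  | cons l ls ih =>
    intro s
    rw [List.foldl_cons, ih, List.reverse_cons, pvLastField_snoc, pvStepA_pub]

-- once in_content is set, A appends exactly the non-header lines
theorem pvFoldA_inContent (ls : List String) : ∀ t u p tl,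
    (ls.foldl pvStepA (t, u, p, tl, true)).2.2.2.1 = tl ++ ls.filter (fun l => !pvIsHeader l) := by
  induction ls with
  | nil => intro t u p tl; simp
  | cons l ls ih =>
    intro t u p tl
    rw [List.foldl_cons]
    by_cases h1 : PySem.Str.startswith l "Title: " = true
    · simp only [pvStepA, h1, if_true]
      rw [ih]
      have hh : pvIsHeader l = true := by
        simp only [pvIsHeader, h1, Bool.true_or]
      rw [List.filter_cons, hh]
      rfl
    · by_cases h2 : PySem.Str.startswith l "URL Source: " = true
      · simp only [pvStepA, h1, h2, if_true, Bool.false_eq_true, if_false]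
        rw [ih]
        have hh : pvIsHeader l = true := by
          simp only [pvIsHeader, h2, Bool.true_or, Bool.or_true]
        rw [List.filter_cons, hh]
        rfl
      · by_cases h3 : PySem.Str.startswith l "Published Time: " = true
        · simp only [pvStepA, h1, h2, h3, if_true, Bool.false_eq_true, if_false]
          rw [ih]
          have hh : pvIsHeader l = true := by
            simp only [pvIsHeader, h3, Bool.or_true]
          rw [List.filter_cons, hh]
          rfl
        · have hk : pvIsHeader l = false := by
            rw [pvIsHeader, Bool.eq_false_iff.2 h1, Bool.eq_false_iff.2 h2, Bool.eq_false_iff.2 h3]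
            rfl
          simp only [pvStepA, h1, h2, h3, Bool.false_eq_true, if_false, Bool.not_true,
            Bool.and_false, if_true]
          rw [ih, List.filter_cons, hk]
          simp

-- a non-blank line in front leaves the body unchanged
theorem pvBodyOf_cons_nonblank (l : String) (ls : List String)
    (h : (PySem.Str.strip l == "") = false) : pvBodyOf (l :: ls) = pvBodyOf ls := by
  simp only [pvBodyOf, List.findIdx?_cons, h, Bool.false_eq_true, if_false]
  cases hfi : ls.findIdx? (fun l => PySem.Str.strip l == "") with
  | none => rfl
  | some i => simp [List.drop_succ_cons]

-- before the first blank line, A collects exactly pvBodyOf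
theorem pvFoldA_body (ls : List String) : ∀ t u p,
    (ls.foldl pvStepA (t, u, p, ([] : List String), false)).2.2.2.1 = pvBodyOf ls := by
  induction ls with
  | nil => intro t u p; simp [pvBodyOf]
  | cons l ls ih =>
    intro t u p
    rw [List.foldl_cons]
    by_cases h1 : PySem.Str.startswith l "Title: " = true
    · simp only [pvStepA, h1, if_true]
      rw [ih, pvBodyOf_cons_nonblank l ls (pvNonblank_of_sw l "Title: " h1 'T' pvTitle_head (by decide))]
    · by_cases h2 : PySem.Str.startswith l "URL Source: " = true
      · simp only [pvStepA, h1, h2, if_true, Bool.false_eq_true, if_false]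
        rw [ih, pvBodyOf_cons_nonblank l ls (pvNonblank_of_sw l "URL Source: " h2 'U' pvUrl_head (by decide))]
      · by_cases h3 : PySem.Str.startswith l "Published Time: " = true
        · simp only [pvStepA, h1, h2, h3, if_true, Bool.false_eq_true, if_false]
          rw [ih, pvBodyOf_cons_nonblank l ls (pvNonblank_of_sw l "Published Time: " h3 'P' pvPub_head (by decide))]
        · by_cases hb : (PySem.Str.strip l == "") = true
          · simp only [pvStepA, h1, h2, h3, hb, Bool.false_eq_true, if_false, Bool.not_false,
              Bool.and_true, if_true]
            rw [pvFoldA_inContent]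
            simp [pvBodyOf, List.findIdx?_cons, hb]
          · have hb' : (PySem.Str.strip l == "") = false := Bool.eq_false_iff.2 hb
            simp only [pvStepA, h1, h2, h3, hb', Bool.false_eq_true, if_false, Bool.false_and]
            rw [ih, pvBodyOf_cons_nonblank l ls hb']

-- ===== VERDICT (by name: the statement is the Claim_ definition above) =====
theorem parse_jina_response_py_spec : Claim_equal_parse_jina_response_py := by
  intro content original_url _
  unfold Spec_parse_jina_response_py
  simp only [parse_jina_response_py, parse_jina_response_py_alt,
    pvFoldA_title, pvFoldA_url, pvFoldA_pub, pvFoldA_body]
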